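-- pv_equiv track=rewrite | github.com/MinaKhamesi/Problem-solving-questions | Very Hard/SquareOfZeroes.py | squareOfZeros
-- ===== SOURCE A (Python) =====
-- def squareOfZeros(matrix):
--     infoMatrix = getZeroCounts(matrix)
--     n = len(matrix)
--     for topRow in range(n):
--         for leftCol in range(n):
--             length = 2
--             while leftCol + length <= n and topRow + length <= n:
--                 bottomRow = topRow + length - 1
--                 rightCol = leftCol + length - 1
--                 if isSquareOfZeros(topRow , bottomRow , leftCol , rightCol , infoMatrix):
--                     return True
--                 length += 1
--     return False
--
-- def isSquareOfZeros(r1, r2 , c1 , c2 , info):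
--     length = c2 - c1 + 1
--     hasTopBorder = info[r1][c1]['numZerosRight'] >= length
--     hasBottomBorder = info[r2][c1]['numZerosRight'] >= length
--     hasLeftBorder = info[r1][c1]['numZerosBelow'] >= length
--     hasRightBorder = info[r1][c2]['numZerosBelow'] >= length
--     return hasTopBorder and hasBottomBorder and hasLeftBorder and hasRightBorder
--
-- def getZeroCounts(matrix):
--     info = [[x for x in row] for row in matrix]
--     for row in range(len(matrix)):
--         for col in range(len(matrix)):
--             numZero = 1 if matrix[row][col] == 0 else 0
--             info[row][col] = {'numZerosRight' : numZero , 'numZerosBelow' : numZero}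
--     lastIdx = len(matrix) - 1
--     for row in reversed(range(len(matrix))):
--         for col in reversed(range(len(matrix[0]))):
--             if matrix[row][col] == 1: continue
--             if row < lastIdx:
--                 info[row][col]['numZerosBelow'] += info[row+1][col]['numZerosBelow']
--             if col < lastIdx:
--                 info[row][col]['numZerosRight'] += info[row][col + 1]['numZerosRight']
--     return info
-- ===== SOURCE B (Python) =====
-- def squareOfZeros(matrix):
--     n = len(matrix)
--
--     def rowRun(r, c, need):
--         # walk right from (r, c): count zeros, stop at a 1; True once `need` zeros seen
--         cnt = 0
--         while c < n:
--             v = matrix[r][c]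
--             if v == 1:
--                 return False
--             if v == 0:
--                 cnt += 1
--                 if cnt == need:
--                     return True
--             c += 1
--         return False
--
--     def colRun(r, c, need):
--         # same, walking down from (r, c)
--         cnt = 0
--         while r < n:
--             v = matrix[r][c]
--             if v == 1:
--                 return False
--             if v == 0:
--                 cnt += 1
--                 if cnt == need:
--                     return True
--             r += 1
--         return False
--
--     for size in range(2, n + 1):
--         for top in range(n - size + 1):
--             for left in range(n - size + 1):
--                 if (rowRun(top, left, size) and rowRun(top + size - 1, left, size)
--                         and colRun(top, left, size) and colRun(top, left + size - 1, size)):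
--                     return True
--     return False
-- ===== Notes on version B (the rewrite author's own statement) =====
-- stated objective: simpler
-- what changed: drops A's two-pass per-cell run-length DP (dicts of consecutive-zero counts filled by a reversed double loop) entirely: each candidate square's four borders are tested by direct early-exit scans along the row/column, and squares are enumerated by size outermost with plain for-ranges instead of A's per-corner while loop.
-- outside the precondition, e.g. on squareOfZeros([[1, 1, 1], [1, 1, 1]]): A returns False, B returns False
import Mathlib
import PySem

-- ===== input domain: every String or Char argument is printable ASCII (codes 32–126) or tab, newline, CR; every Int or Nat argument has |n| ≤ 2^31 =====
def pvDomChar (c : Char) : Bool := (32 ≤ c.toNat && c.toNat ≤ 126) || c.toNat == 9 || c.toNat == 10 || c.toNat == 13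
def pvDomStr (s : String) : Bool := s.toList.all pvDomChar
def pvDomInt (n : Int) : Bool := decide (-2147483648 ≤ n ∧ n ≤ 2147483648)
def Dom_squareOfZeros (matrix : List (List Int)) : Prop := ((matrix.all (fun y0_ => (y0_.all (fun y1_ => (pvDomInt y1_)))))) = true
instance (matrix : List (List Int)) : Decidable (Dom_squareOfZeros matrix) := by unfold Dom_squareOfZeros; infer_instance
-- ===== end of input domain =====

-- B drops A's two-pass per-cell run-length DP entirely: each candidate border is tested by a
-- direct early-exit scan, with squares enumerated by size outermost (simpler, no tables).

-- ===== PORT A =====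
-- A stores per cell a dict {'numZerosRight','numZerosBelow'}; ported as the pair (right, below).
def zvalA (v : Int) : Int := if v = 0 then 1 else 0

-- one row of A's reversed in-place update loop, right to left; `b` is the already-updated
-- row below ([] for the last row); the col<lastIdx / row<lastIdx guards become list emptiness
-- (equivalent on Pre_, where the processed row has exactly n entries).
def rowA : List Int → List (Int × Int) → List (Int × Int)
  | [], _ => []
  | v :: vs, b =>
    let rest := rowA vs b.tail
    (if v = 1 then ((0 : Int), (0 : Int))
     else (zvalA v + ((rest.head?.map Prod.fst).getD 0),
           zvalA v + ((b.head?.map Prod.snd).getD 0))) :: rest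

-- A's getZeroCounts: rows processed bottom-up; both column loops run over the first n columns.
def buildA (n : Nat) : List (List Int) → List (List (Int × Int))
  | [] => []
  | row :: rows =>
    let below := buildA n rows
    rowA (row.take n) (below.headD []) :: below

def isSqA (r1 r2 c1 c2 : Nat) (info : List (List (Int × Int))) : Bool :=
  let len : Int := (c2 : Int) - (c1 : Int) + 1
  decide ((((info.getD r1 []).getD c1 (0, 0)).1 ≥ len) ∧
          (((info.getD r2 []).getD c1 (0, 0)).1 ≥ len) ∧
          (((info.getD r1 []).getD c1 (0, 0)).2 ≥ len) ∧
          (((info.getD r1 []).getD c2 (0, 0)).2 ≥ len))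

-- A's inner while loop, as fuel recursion (fuel n is enough: the loop runs at most n-1 times).
def whileA (info : List (List (Int × Int))) (n top left : Nat) : Nat → Nat → Bool
  | _, 0 => false
  | length, fuel + 1 =>
    if left + length ≤ n ∧ top + length ≤ n then
      if isSqA top (top + length - 1) left (left + length - 1) info then true
      else whileA info n top left (length + 1) fuel
    else false

def squareOfZeros (matrix : List (List Int)) : Bool :=
  let n := matrix.length
  let info := buildA n matrix
  (List.range n).any fun topRow =>
    (List.range n).any fun leftCol =>
      whileA info n topRow leftCol 2 n

-- ===== PORT B =====
-- Source B's rowRun/colRun while loops: walk the remaining cells of the line (the list of cells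
-- the loop would visit), counting zeros, failing at a 1, succeeding once `need` zeros are seen.
def scanB : List Int → Int → Int → Bool
  | [], _, _ => false
  | v :: vs, cnt, need =>
    if v = 1 then false
    else if v = 0 then (if cnt + 1 = need then true else scanB vs (cnt + 1) need)
    else scanB vs cnt need

def squareOfZeros_alt (matrix : List (List Int)) : Bool :=
  let n := matrix.length
  (List.range' 2 (n - 1)).any fun size =>           -- range(2, n+1)
    (List.range (n - size + 1)).any fun top =>
      (List.range (n - size + 1)).any fun left =>
        scanB (((matrix.getD top []).take n).drop left) 0 (size : Int) &&
          (scanB (((matrix.getD (top + size - 1) []).take n).drop left) 0 (size : Int) &&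
            (scanB ((matrix.drop top).map fun row => row.getD left 0) 0 (size : Int) &&
              scanB ((matrix.drop top).map fun row => row.getD (left + size - 1) 0) 0 (size : Int)))

-- ===== PRECONDITION & SPEC =====
-- Pre_ admits matrices whose first row has exactly len(matrix) entries and whose rows all have
-- at least that many (A reads only the n×n prefix there), plus any nonempty single-row matrix
-- (no square of side ≥ 2 fits, so A returns False without touching the ragged part): outside
-- this A raises IndexError/TypeError on the ragged part, except for some ragged inputs whose
-- out-of-range cells happen never to be inspected, where A returns the n×n-prefix answer
-- (as B does).
def Pre_squareOfZeros (matrix : List (List Int)) : Prop :=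
  ((matrix.headD []).length = matrix.length ∧ ∀ row ∈ matrix, matrix.length ≤ row.length) ∨
    (matrix.length = 1 ∧ matrix.headD [] ≠ [])
instance (matrix : List (List Int)) : Decidable (Pre_squareOfZeros matrix) := by
  unfold Pre_squareOfZeros; infer_instance
def pvWitness_squareOfZeros : List (List Int) := [[0, 1], [1, 0]]

def Spec_squareOfZeros (matrix : List (List Int)) (out : Bool) : Prop := out = squareOfZeros_alt matrix
instance (matrix : List (List Int)) (out : Bool) : Decidable (Spec_squareOfZeros matrix out) := by unfold Spec_squareOfZeros; infer_instance

-- ===== CLAIM (what is proved, stated in full; the proofs are below) =====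
def Claim_equal_squareOfZeros : Prop := ∀ (matrix : List (List Int)), Dom_squareOfZeros matrix → Pre_squareOfZeros matrix → Spec_squareOfZeros matrix (squareOfZeros matrix)

-- ===== LEMMAS AND PROOFS =====

-- the value A's run-length recurrence assigns to the head of a line.
def rcA : List Int → Int
  | [] => 0
  | v :: vs => if v = 1 then 0 else zvalA v + rcA vs

theorem getD_headD_drop {α : Type} (l : List α) (r : Nat) (d : α) :
    l.getD r d = (l.drop r).headD d := by
  induction l generalizing r with
  | nil => cases r <;> simp [List.getD]
  | cons x xs _ =>
    cases r with
    | zero => simp [List.getD]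
    | succ r => simp [List.getD]

theorem headD_fst (l : List (Int × Int)) :
    (l.headD (0, 0)).1 = ((l.head?.map Prod.fst).getD 0) := by
  cases l <;> simp

theorem headD_snd (l : List (Int × Int)) :
    (l.headD (0, 0)).2 = ((l.head?.map Prod.snd).getD 0) := by
  cases l <;> simp

theorem rowA_drop (c : Nat) : ∀ (vs : List Int) (b : List (Int × Int)),
    (rowA vs b).drop c = rowA (vs.drop c) (b.drop c) := by
  induction c with
  | zero => intro vs b; simp
  | succ c ih =>
    intro vs b
    cases vs with
    | nil => simp [rowA]
    | cons v vs =>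
      show (rowA (v :: vs) b).drop (c + 1) = _
      have h1 : (rowA (v :: vs) b).drop (c + 1) = (rowA vs b.tail).drop c := by
        simp [rowA]
      rw [h1, ih, ← List.drop_one, List.drop_drop]
      simp [Nat.add_comm]

theorem rowA_head_fst : ∀ (vs : List Int) (b : List (Int × Int)),
    ((rowA vs b).head?.map Prod.fst).getD 0 = rcA vs := by
  intro vs
  induction vs with
  | nil => intro b; simp [rowA, rcA]
  | cons v vs ih =>
    intro b
    simp only [rowA, List.head?_cons, Option.map_some, Option.getD_some]
    by_cases h : v = 1
    · simp [h, rcA]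
    · simp [h, rcA, ih]

theorem rowA_head_snd (v : Int) (vs : List Int) (b : List (Int × Int)) :
    ((rowA (v :: vs) b).head?.map Prod.snd).getD 0 =
      if v = 1 then 0 else zvalA v + ((b.head?.map Prod.snd).getD 0) := by
  simp only [rowA, List.head?_cons, Option.map_some, Option.getD_some]
  split <;> rfl

theorem take_drop_cons {l : List Int} {n c : Nat} (hc : c < n) (hn : n ≤ l.length) :
    (l.take n).drop c = l.getD c 0 :: (l.take n).drop (c + 1) := by
  have hc' : c < (l.take n).length := by simp; omega
  rw [List.drop_eq_getElem_cons hc']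
  congr 1
  rw [List.getElem_take, List.getD_eq_getElem l 0 (by omega)]

theorem buildA_drop (n : Nat) : ∀ (m : List (List Int)) (r : Nat),
    (buildA n m).drop r = buildA n (m.drop r) := by
  intro m
  induction m with
  | nil => intro r; simp [buildA]
  | cons row rows ih =>
    intro r
    cases r with
    | zero => simp
    | succ r => simpa [buildA] using ih r

theorem buildA_col (n : Nat) : ∀ (m : List (List Int)) (c : Nat), c < n →
    (∀ row ∈ m, n ≤ row.length) →
    ((((buildA n m).headD []).drop c).head?.map Prod.snd).getD 0 =
      rcA (m.map fun row => row.getD c 0) := by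
  intro m
  induction m with
  | nil => intro c hc hall; simp [buildA, rcA]
  | cons row rows ih =>
    intro c hc hall
    have hrow : n ≤ row.length := hall row (by simp)
    show ((((rowA (row.take n) ((buildA n rows).headD [])).drop c).head?.map Prod.snd).getD 0) = _
    rw [rowA_drop, take_drop_cons hc hrow, rowA_head_snd]
    rw [ih c hc (fun r hr => hall r (by simp [hr]))]
    simp only [List.map_cons, rcA]

theorem buildA_fst (n : Nat) (m : List (List Int)) (r c : Nat) :
    (((buildA n m).getD r []).getD c (0, 0)).1 = rcA (((m.getD r []).take n).drop c) := by
  rw [getD_headD_drop (buildA n m) r, buildA_drop, getD_headD_drop m r]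
  cases h : m.drop r with
  | nil => simp [buildA, rcA]
  | cons row rest =>
    show ((rowA (row.take n) ((buildA n rest).headD [])).getD c (0, 0)).1 = _
    rw [getD_headD_drop _ c, rowA_drop, headD_fst, rowA_head_fst]
    simp

theorem buildA_snd (n : Nat) (m : List (List Int)) (r c : Nat) (hc : c < n)
    (hall : ∀ row ∈ m, n ≤ row.length) :
    (((buildA n m).getD r []).getD c (0, 0)).2 =
      rcA ((m.drop r).map fun row => row.getD c 0) := by
  rw [getD_headD_drop (buildA n m) r, buildA_drop, getD_headD_drop _ c, headD_snd]
  exact buildA_col n (m.drop r) c hc (fun row hr => hall row (List.mem_of_mem_drop hr))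

theorem whileA_eq (info : List (List (Int × Int))) (n top left : Nat)
    (ht : top < n) (hl : left < n) :
    ∀ (fuel L : Nat), 1 ≤ L → n - max top left + 1 ≤ L + fuel →
    whileA info n top left L fuel =
      (List.range' L (n - max top left + 1 - L)).any
        (fun size => isSqA top (top + size - 1) left (left + size - 1) info) := by
  intro fuel
  induction fuel with
  | zero =>
    intro L hL hfuel
    have : n - max top left + 1 - L = 0 := by omega
    simp [whileA, this]
  | succ fuel ih =>
    intro L hL hfuel
    by_cases hcond : left + L ≤ n ∧ top + L ≤ n
    · have hcount : n - max top left + 1 - L = (n - max top left - L) + 1 := by omega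
      rw [hcount, List.range'_succ]
      show (if left + L ≤ n ∧ top + L ≤ n then _ else false) = _
      rw [if_pos hcond]
      by_cases hsq : isSqA top (top + L - 1) left (left + L - 1) info = true
      · simp [hsq]
      · simp only [List.any_cons]
        rw [if_neg hsq, ih (L + 1) (by omega) (by omega)]
        have : n - max top left + 1 - (L + 1) = n - max top left - L := by omega
        rw [this]
        simp [Bool.eq_false_iff.mpr hsq]
    · have : n - max top left + 1 - L = 0 := by omega
      show (if left + L ≤ n ∧ top + L ≤ n then _ else false) = _
      rw [if_neg hcond, this]
      simp

-- rcA is nonnegative.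
theorem rcA_nonneg (l : List Int) : 0 ≤ rcA l := by
  induction l with
  | nil => simp [rcA]
  | cons v vs ih =>
    simp only [rcA]
    split
    · omega
    · unfold zvalA; split <;> omega


-- scanB computes exactly the run-count comparison need ≤ cnt + rcA.
theorem scanB_eq (l : List Int) : ∀ (cnt need : Int), cnt < need →
    scanB l cnt need = decide (need ≤ cnt + rcA l) := by
  induction l with
  | nil =>
    intro cnt need h
    have hn : ¬ need ≤ cnt + rcA [] := by simp [rcA]; omega
    show false = decide (need ≤ cnt + rcA [])
    rw [decide_eq_false hn]
  | cons v vs ih =>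
    intro cnt need h
    have hs : scanB (v :: vs) cnt need =
        (if v = 1 then false
         else if v = 0 then (if cnt + 1 = need then true else scanB vs (cnt + 1) need)
         else scanB vs cnt need) := rfl
    have hr : rcA (v :: vs) = if v = 1 then 0 else zvalA v + rcA vs := rfl
    rw [hs, hr]
    by_cases hv1 : v = 1
    · rw [if_pos hv1, if_pos hv1]
      have hn : ¬ need ≤ cnt + 0 := by omega
      rw [decide_eq_false hn]
    · rw [if_neg hv1, if_neg hv1]
      by_cases hv0 : v = 0
      · rw [if_pos hv0]
        have hz : zvalA v = 1 := by unfold zvalA; rw [if_pos hv0]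
        rw [hz]
        by_cases he : cnt + 1 = need
        · rw [if_pos he]
          have h0 := rcA_nonneg vs
          have hy : need ≤ cnt + (1 + rcA vs) := by omega
          rw [decide_eq_true hy]
        · rw [if_neg he, ih (cnt + 1) need (by omega)]
          simp only [decide_eq_decide]
          omega
      · rw [if_neg hv0]
        have hz : zvalA v = 0 := by unfold zvalA; rw [if_neg hv0]
        rw [hz, ih cnt need h]
        simp only [decide_eq_decide]
        omega

-- A's four run tests coincide with B's four border scans.
theorem isSq_iff (m : List (List Int)) (top left size : Nat)
    (hall : ∀ row ∈ m, m.length ≤ row.length)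
    (h2 : 2 ≤ size) (_hts : top + size ≤ m.length) (hls : left + size ≤ m.length) :
    isSqA top (top + size - 1) left (left + size - 1) (buildA m.length m) =
      (scanB (((m.getD top []).take m.length).drop left) 0 (size : Int) &&
        (scanB (((m.getD (top + size - 1) []).take m.length).drop left) 0 (size : Int) &&
          (scanB ((m.drop top).map fun row => row.getD left 0) 0 (size : Int) &&
            scanB ((m.drop top).map fun row => row.getD (left + size - 1) 0) 0 (size : Int)))) := by
  have hlen : ((left + size - 1 : Nat) : Int) - (left : Nat) + 1 = (size : Int) := by
    omega
  have hcl : (0 : Int) < (size : Int) := by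
    omega
  rw [scanB_eq _ _ _ hcl, scanB_eq _ _ _ hcl, scanB_eq _ _ _ hcl, scanB_eq _ _ _ hcl]
  unfold isSqA
  simp only [hlen, ← Bool.decide_and]
  rw [buildA_fst, buildA_fst, buildA_snd _ _ _ _ (by omega) hall,
      buildA_snd _ _ _ _ (by omega) hall]
  simp only [ge_iff_le, zero_add]

-- ===== VERDICT (by name: the statement is the Claim_ definition above) =====
theorem squareOfZeros_spec : Claim_equal_squareOfZeros := by
  intro m _ hPre
  rcases hPre with ⟨hhead, hall⟩ | ⟨h1, _⟩
  case inr =>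
    unfold Spec_squareOfZeros squareOfZeros squareOfZeros_alt
    simp only
    rw [h1]
    simp [List.range_succ, whileA]
  unfold Spec_squareOfZeros squareOfZeros squareOfZeros_alt
  simp only
  rw [Bool.eq_iff_iff]
  simp only [List.any_eq_true, List.mem_range]
  constructor
  · rintro ⟨top, htop, left, hleft, hw⟩
    rw [whileA_eq _ _ _ _ htop hleft m.length 2 (by omega) (by omega)] at hw
    rw [List.any_eq_true] at hw
    obtain ⟨size, hmem, hsq⟩ := hw
    rw [List.mem_range'_1] at hmem
    have h2 : 2 ≤ size := hmem.1
    have hts : top + size ≤ m.length := by omega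
    have hls : left + size ≤ m.length := by omega
    refine ⟨size, List.mem_range'_1.mpr ⟨h2, by omega⟩, top, by omega, left, by omega, ?_⟩
    rw [← isSq_iff m top left size hall h2 hts hls]
    exact hsq
  · rintro ⟨size, hsize, top, htop, left, hleft, hcond⟩
    rw [List.mem_range'_1] at hsize
    have h2 : 2 ≤ size := hsize.1
    have hts : top + size ≤ m.length := by omega
    have hls : left + size ≤ m.length := by omega
    refine ⟨top, by omega, left, by omega, ?_⟩
    rw [whileA_eq _ _ _ _ (by omega) (by omega) m.length 2 (by omega) (by omega),
        List.any_eq_true]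
    refine ⟨size, List.mem_range'_1.mpr ⟨h2, by omega⟩, ?_⟩
    rw [isSq_iff m top left size hall h2 hts hls]
    exact hcond
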